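-- pv_equiv track=rewrite | github.com/aniruddh-23/codingProblems | ExpressAnumber.py | Enum2
-- ===== SOURCE A (Python) =====
-- def Enum2(num):
--     t_list = {}
--     t_list[1] = 0
--     for i in range(2,num+1):
--         total= 0
--         for j in range(1,i):
--             total+=t_list[i-j]+1
--         t_list[i] = total
--     return t_list[num]
-- ===== SOURCE B (Python) =====
-- def Enum2(num):
--     # running prefix sum: t[i] = (i-1) + S_{i-1}, S updated incrementally
--     t = 0  # t[1]
--     s = 0  # sum of t[1..i-1]
--     for i in range(2, num + 1):
--         s += t
--         t = (i - 1) + s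
--     return t
-- ===== Notes on version B (the rewrite author's own statement) =====
-- stated objective: faster
-- what changed: Replaces the dict of all previous terms and the inner loop re-summing them with two scalars (current term and running prefix sum), using t[i] = (i-1) + S_{i-1}.
-- outside the precondition, e.g. on Enum2(0): A raises KeyError, B returns 0
import Mathlib
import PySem

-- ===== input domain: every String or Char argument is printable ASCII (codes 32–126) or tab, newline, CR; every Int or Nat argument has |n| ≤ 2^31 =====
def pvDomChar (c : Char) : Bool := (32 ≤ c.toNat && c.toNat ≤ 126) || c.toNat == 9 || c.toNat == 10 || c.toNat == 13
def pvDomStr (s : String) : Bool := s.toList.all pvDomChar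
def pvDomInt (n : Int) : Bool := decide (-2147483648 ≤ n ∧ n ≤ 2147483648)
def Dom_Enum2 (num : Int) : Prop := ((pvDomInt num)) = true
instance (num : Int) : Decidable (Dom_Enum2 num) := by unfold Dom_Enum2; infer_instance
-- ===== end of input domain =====

-- B replaces A's dict of all previous terms and its inner re-summing loop by a running
-- prefix sum kept in a scalar (t[i] = (i-1) + S_{i-1}): O(n) loop steps instead of O(n^2).

-- ===== PORT A =====
def Enum2 (num : Int) : Int :=
  let d0 : PySem.Dict Int Int := (PySem.Dict.empty).insert 1 0
  let d := (PySem.List.pyRange 2 (num + 1) 1).foldl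
    (fun d i =>
      let total := (PySem.List.pyRange 1 i 1).foldl
        (fun total j => total + (PySem.Dict.getD d (i - j) 0) + 1) 0
      d.insert i total) d0
  -- t_list[num]: key present exactly when num ≥ 1 (Pre_); getD 0 stands for the lookup
  PySem.Dict.getD d num 0

-- ===== PORT B =====
def Enum2_alt (num : Int) : Int :=
  let st := (PySem.List.pyRange 2 (num + 1) 1).foldl
    (fun (ts : Int × Int) i =>
      let s := ts.2 + ts.1
      ((i - 1) + s, s)) (0, 0)
  st.1

-- ===== PRECONDITION & SPEC =====
-- Pre_ excludes num ≤ 0, on which A raises KeyError (t_list[num] with only key 1 present).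
def Pre_Enum2 (num : Int) : Prop := 1 ≤ num
instance (num : Int) : Decidable (Pre_Enum2 num) := by unfold Pre_Enum2; infer_instance
def pvWitness_Enum2 : Int := 5

def Spec_Enum2 (num : Int) (out : Int) : Prop := out = Enum2_alt num
instance (num : Int) (out : Int) : Decidable (Spec_Enum2 num out) := by unfold Spec_Enum2; infer_instance

-- ===== CLAIM (what is proved, stated in full; the proofs are below) =====
def Claim_equal_Enum2 : Prop := ∀ (num : Int), Dom_Enum2 num → Pre_Enum2 num → Spec_Enum2 num (Enum2 num)

-- ===== LEMMAS AND PROOFS =====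

-- the closed value of the recurrence: t[m] = 2^(m-1) - 1
def pvVal (m : Int) : Int := 2 ^ (m - 1).toNat - 1

-- A's inner loop: summing getD over a dict holding pvVal on [1, i) telescopes to 2^k - 1
lemma pvInner (d : PySem.Dict Int Int) (i : Int)
    (hd : ∀ m : Int, 1 ≤ m → m < i → d.getD m 0 = pvVal m) :
    ∀ (k : Nat) (a acc : Int), a = i - k → 1 ≤ a →
      (PySem.List.pyRange a i 1).foldl (fun total j => total + (d.getD (i - j) 0) + 1) acc
        = acc + 2 ^ k - 1 := by
  intro k
  induction k with
  | zero =>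
      intro a acc ha h1
      have : i ≤ a := by omega
      rw [PySem.List.pyRange_one_eq_nil this]
      simp
  | succ k ih =>
      intro a acc ha h1
      have hlt : a < i := by omega
      rw [PySem.List.pyRange_one_cons hlt]
      simp only [List.foldl_cons]
      have hval : d.getD (i - a) 0 = pvVal (i - a) := hd _ (by omega) (by omega)
      rw [ih (a + 1) _ (by omega) (by omega), hval]
      have hia : (i - a) = (k : Int) + 1 := by omega
      have : ((i - a) - 1).toNat = k := by omega
      simp only [pvVal, this]
      ring

-- A's outer loop invariant: after processing range(2, 2+k) the dict holds pvVal on [1, 1+k]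
lemma pvOuter : ∀ k : Nat, ∀ m : Int, 1 ≤ m → m ≤ 1 + (k : Int) →
    ((PySem.List.pyRange 2 (2 + (k : Int)) 1).foldl
      (fun d i =>
        let total := (PySem.List.pyRange 1 i 1).foldl
          (fun total j => total + (PySem.Dict.getD d (i - j) 0) + 1) 0
        d.insert i total) ((PySem.Dict.empty : PySem.Dict Int Int).insert 1 0)).getD m 0
      = pvVal m := by
  intro k
  induction k with
  | zero =>
      intro m h1 h2
      have hm : m = 1 := by omega
      rw [PySem.List.pyRange_one_eq_nil (by omega)]
      simp [hm, PySem.Dict.getD_insert_self, pvVal]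
  | succ k ih =>
      intro m h1 h2
      have hsplit : PySem.List.pyRange 2 (2 + ((k : Int) + 1)) 1
          = PySem.List.pyRange 2 (2 + (k : Int)) 1 ++ [2 + (k : Int)] := by
        have := PySem.List.pyRange_one_succ_right (a := 2) (b := 2 + (k : Int)) (by omega)
        rw [show (2 : Int) + ((k : Int) + 1) = (2 + (k : Int)) + 1 by ring, this]
      push_cast at hsplit h2 ⊢
      rw [hsplit, List.foldl_append]
      simp only [List.foldl_cons, List.foldl_nil]
      rw [PySem.Dict.getD_insert]
      by_cases hm : m = 2 + (k : Int)
      · rw [if_pos hm, hm]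
        rw [pvInner _ _ (fun m' hm1 hm2 => ih m' hm1 (by omega)) (k + 1) 1 0 (by push_cast; omega) (by omega)]
        simp only [pvVal]
        have : ((2 + (k : Int)) - 1).toNat = k + 1 := by omega
        rw [this]
        push_cast
        ring
      · rw [if_neg hm]
        exact ih m h1 (by omega)

-- A computes pvVal num for num ≥ 1
lemma pvA (num : Int) (h : 1 ≤ num) : Enum2 num = pvVal num := by
  unfold Enum2
  have hk : num = 1 + ((num - 1).toNat : Int) := by omega
  have := pvOuter (num - 1).toNat num h (by omega)
  have harg : (2 : Int) + ((num - 1).toNat : Int) = num + 1 := by omega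
  rw [harg] at this
  simpa using this

-- B's loop invariant: state after processing range(2, 2+k) is (2^k - 1, 2^k - 1 - k)
lemma pvB : ∀ k : Nat,
    (PySem.List.pyRange 2 (2 + (k : Int)) 1).foldl
      (fun (ts : Int × Int) i => let s := ts.2 + ts.1; ((i - 1) + s, s)) (0, 0)
      = (2 ^ k - 1, 2 ^ k - 1 - (k : Int)) := by
  intro k
  induction k with
  | zero =>
      rw [PySem.List.pyRange_one_eq_nil (by omega)]
      simp
  | succ k ih =>
      have hsplit : PySem.List.pyRange 2 (2 + ((k : Int) + 1)) 1
          = PySem.List.pyRange 2 (2 + (k : Int)) 1 ++ [2 + (k : Int)] := by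
        have := PySem.List.pyRange_one_succ_right (a := 2) (b := 2 + (k : Int)) (by omega)
        rw [show (2 : Int) + ((k : Int) + 1) = (2 + (k : Int)) + 1 by ring, this]
      push_cast at hsplit ⊢
      rw [hsplit, List.foldl_append, ih]
      simp only [List.foldl_cons, List.foldl_nil]
      refine Prod.ext ?_ ?_ <;> · simp only []; push_cast; ring

-- B computes pvVal num for num ≥ 1
lemma pvBval (num : Int) (h : 1 ≤ num) : Enum2_alt num = pvVal num := by
  unfold Enum2_alt
  have harg : (2 : Int) + (((num - 1).toNat : Int)) = num + 1 := by omega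
  have := pvB (num - 1).toNat
  rw [harg] at this
  rw [this]
  simp only [pvVal]

-- ===== VERDICT (by name: the statement is the Claim_ definition above) =====
theorem Enum2_spec : Claim_equal_Enum2 := by
  intro num _ hpre
  unfold Spec_Enum2
  rw [pvA num hpre, pvBval num hpre]
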